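-- pv_equiv track=rewrite | github.com/jjunhub/coding-test | 백준/Silver/5534. 간판/간판.py | solve
-- ===== SOURCE A (Python) =====
-- def solve(oldName, name):
--   for indent in range(len(oldName)):
--     for index, char in enumerate(oldName):
--      if char == name[0]:
--         flag = 1
--         while(flag < len(name) and index + (indent+1) * flag < len(oldName) and ( oldName[index + (indent+1) * flag] == name[flag])):
--            flag+=1
--
--         if flag == len(name):
--           return 1
--   return 0
-- ===== SOURCE B (Python) =====
-- def solve(oldName, name):
--     # For each stride s, the characters of oldName at positions congruent to r (mod s)
--     # form the string oldName[r::s]; name occurs in oldName with stride s iff it is a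
--     # contiguous substring of one of these residue-class strings.
--     n = len(oldName)
--     for stride in range(1, n + 1):
--         for r in range(stride):
--             if name in oldName[r::stride]:
--                 return 1
--     return 0
-- ===== Notes on version B (the rewrite author's own statement) =====
-- stated objective: alternative
-- what changed: B replaces A's per-(stride,start) character-by-character matching loops by building, for each stride, the residue-class strings oldName[r::stride] and using Python's native substring search on each (measured ~2x, but both remain quadratic, so not claimed as faster).
import Mathlib
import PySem

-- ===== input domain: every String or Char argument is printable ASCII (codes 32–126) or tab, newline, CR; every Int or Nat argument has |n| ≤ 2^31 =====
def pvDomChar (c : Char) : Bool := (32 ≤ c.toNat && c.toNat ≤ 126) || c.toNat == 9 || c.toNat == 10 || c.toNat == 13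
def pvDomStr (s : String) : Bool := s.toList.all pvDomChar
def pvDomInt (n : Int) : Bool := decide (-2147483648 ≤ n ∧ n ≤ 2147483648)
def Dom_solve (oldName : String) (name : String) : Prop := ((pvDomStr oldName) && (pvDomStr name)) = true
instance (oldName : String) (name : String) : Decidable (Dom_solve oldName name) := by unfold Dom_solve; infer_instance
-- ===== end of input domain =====

-- B replaces A's per-(stride,start) character-by-character matching by substring search in the
-- per-stride residue-class strings oldName[r::stride]; equivalence is on the return value only.

-- ===== PORT A =====
-- the 'while' loop of A: advance flag as long as the next stride-character matches
def pvAWhile (old nm : List Char) (index s flag : Nat) : Nat :=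
  if h : flag < nm.length ∧ index + s * flag < old.length ∧
         old.getD (index + s * flag) ' ' = nm.getD flag ' '
  then pvAWhile old nm index s (flag + 1)
  else flag
termination_by nm.length - flag
decreasing_by omega

-- name[0] is ported as nm.getD 0 ' ' (exact whenever name ≠ ""; name = "" with oldName ≠ "" raises in A and is outside Pre_)
def solve (oldName : String) (name : String) : Int :=
  let old := oldName.toList
  let nm := name.toList
  if (List.range old.length).any (fun indent =>
       (List.range old.length).any (fun index =>
         (old.getD index ' ' == nm.getD 0 ' ') &&
         (pvAWhile old nm index (indent + 1) 1 == nm.length)))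
  then 1 else 0

-- ===== PORT B =====
-- oldName[r::stride] is PySem.List.slice? (step slice); 'name in …' is PySem.Chars.isIn
def solve_alt (oldName : String) (name : String) : Int :=
  let old := oldName.toList
  let nm := name.toList
  if (List.range old.length).any (fun i =>
       (List.range (i + 1)).any (fun r =>
         PySem.Chars.isIn nm ((PySem.List.slice? old (some (r : Int)) none ((i : Int) + 1)).getD [])))
  then 1 else 0

-- ===== PRECONDITION & SPEC =====
-- Pre_ excludes exactly the inputs where A raises: name = "" with oldName ≠ "" hits IndexError on name[0].
def Pre_solve (oldName : String) (name : String) : Prop := oldName = "" ∨ name ≠ ""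
instance (oldName : String) (name : String) : Decidable (Pre_solve oldName name) := by
  unfold Pre_solve; infer_instance
def pvWitness_solve : String × String := ("abcabc", "bb")

def Spec_solve (oldName : String) (name : String) (out : Int) : Prop := out = solve_alt oldName name
instance (oldName : String) (name : String) (out : Int) : Decidable (Spec_solve oldName name out) := by
  unfold Spec_solve; infer_instance

-- ===== CLAIM (what is proved, stated in full; the proofs are below) =====
def Claim_equal_solve : Prop := ∀ (oldName : String) (name : String), Dom_solve oldName name →
  Pre_solve oldName name → Spec_solve oldName name (solve oldName name)

-- ===== LEMMAS AND PROOFS =====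

-- "name matches in old starting at index with stride s, from position lo on"
def MatchFrom (old nm : List Char) (s index lo : Nat) : Prop :=
  ∀ f, lo ≤ f → f < nm.length →
    index + s * f < old.length ∧ old.getD (index + s * f) ' ' = nm.getD f ' '

lemma pvAWhile_eq_iff (old nm : List Char) (index s : Nat) :
    ∀ k flag, nm.length - flag = k → flag ≤ nm.length →
      (pvAWhile old nm index s flag = nm.length ↔ MatchFrom old nm s index flag) := by
  intro k
  induction k with
  | zero =>
    intro flag hk hle
    rw [pvAWhile]
    have hneg : ¬ (flag < nm.length ∧ index + s * flag < old.length ∧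
        old.getD (index + s * flag) ' ' = nm.getD flag ' ') := by
      intro h; omega
    rw [dif_neg hneg]
    constructor
    · intro _ f hf1 hf2; omega
    · intro _; omega
  | succ k ih =>
    intro flag hk hle
    have hlt : flag < nm.length := by omega
    rw [pvAWhile]
    by_cases hc : flag < nm.length ∧ index + s * flag < old.length ∧
        old.getD (index + s * flag) ' ' = nm.getD flag ' '
    · rw [dif_pos hc]
      rw [ih (flag + 1) (by omega) (by omega)]
      constructor
      · intro h f hf1 hf2
        rcases Nat.eq_or_lt_of_le hf1 with rfl | hgt
        · exact ⟨hc.2.1, hc.2.2⟩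
        · exact h f hgt hf2
      · intro h f hf1 hf2
        exact h f (by omega) hf2
    · rw [dif_neg hc]
      constructor
      · intro h; omega
      · intro h
        exact absurd ⟨hlt, h flag le_rfl hlt⟩ hc

lemma A_any_iff (old nm : List Char) (hnm : nm ≠ []) (indent : Nat) :
    ((List.range old.length).any (fun index =>
        (old.getD index ' ' == nm.getD 0 ' ') &&
        (pvAWhile old nm index (indent + 1) 1 == nm.length)) = true) ↔
      ∃ idx < old.length, MatchFrom old nm (indent + 1) idx 0 := by
  have hlen : 1 ≤ nm.length := by
    cases nm with
    | nil => exact absurd rfl hnm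
    | cons a l => simp
  simp only [List.any_eq_true, List.mem_range, Bool.and_eq_true, beq_iff_eq]
  constructor
  · rintro ⟨idx, hidx, hhead, hwhile⟩
    refine ⟨idx, hidx, ?_⟩
    have h1 := (pvAWhile_eq_iff old nm idx (indent + 1) (nm.length - 1) 1 rfl hlen).mp hwhile
    intro f hf0 hf
    rcases Nat.eq_zero_or_pos f with rfl | hfpos
    · simpa using ⟨hidx, hhead⟩
    · exact h1 f hfpos hf
  · rintro ⟨idx, hidx, hm⟩
    refine ⟨idx, hidx, ?_, ?_⟩
    · have := (hm 0 (le_refl 0) (by omega)).2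
      simpa using this
    · exact (pvAWhile_eq_iff old nm idx (indent + 1) (nm.length - 1) 1 rfl hlen).mpr
        (fun f hf1 hf2 => hm f (by omega) hf2)

-- the residue-class slice old[r::s] as an explicit map over indices
lemma slice?_step_eq (old : List Char) (r s : Nat) (hr : r < old.length) (hs : 1 ≤ s) :
    PySem.List.slice? old (some (r : Int)) none (s : Int) =
      some ((List.range ((old.length - r + s - 1) / s)).map
        (fun q => old.getD (r + s * q) ' ')) := by
  have hs0 : (s : Int) ≠ 0 := by exact_mod_cast Nat.one_le_iff_ne_zero.mp hs
  unfold PySem.List.slice? PySem.List.sliceIndices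
  rw [if_neg hs0]
  have h1 : ¬ ((s : Int) < 0) := by omega
  have h2 : ¬ ((r : Int) < 0) := by omega
  have h3 : (0:Int) < s := by omega
  have h4 : min (r:Int) (old.length : Int) = (r:Int) := by omega
  have h5 : (r:Int) < (old.length : Int) := by exact_mod_cast hr
  simp only [h1, if_false, h2, h3, if_true, h4, h5]
  have hc : ((↑old.length - ↑r + ↑s - 1 : Int) / ↑s).toNat = (old.length - r + s - 1) / s := by
    have he : ((old.length : Int) - r + s - 1) = ((old.length - r + s - 1 : Nat) : Int) := by omega
    rw [he, ← Int.natCast_div]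
    exact Int.toNat_natCast _
  rw [hc]
  congr 1
  have hmem : ∀ x ∈ List.range ((old.length - r + s - 1) / s),
      old[((r:Int) + (s:Int) * (x:Int)).toNat]? = some (old.getD (r + s * x) ' ') := by
    intro x hx
    have hx' : x < (old.length - r + s - 1) / s := List.mem_range.mp hx
    have hidx : r + s * x < old.length := by
      rw [Nat.lt_iff_add_one_le, Nat.le_div_iff_mul_le (by omega)] at hx'
      have h6 : (x + 1) * s = s * x + s := by ring
      omega
    have ht : ((r:Int) + (s:Int) * (x:Int)).toNat = r + s * x := by omega
    rw [ht, List.getElem?_eq_getElem hidx, List.getD_eq_getElem old ' ' hidx]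
  rw [List.filterMap_congr hmem]
  simp

lemma cnt_iff (n r s q : Nat) (hr : r < n) (hs : 1 ≤ s) :
    q < (n - r + s - 1) / s ↔ r + s * q < n := by
  rw [Nat.lt_iff_add_one_le, Nat.le_div_iff_mul_le (by omega)]
  have h1 : (q + 1) * s = s * q + s := by ring
  omega

lemma B_inner_iff (old nm : List Char) (hnm : nm ≠ []) (r s : Nat)
    (hr : r < old.length) (hs : 1 ≤ s) :
    (PySem.Chars.isIn nm ((PySem.List.slice? old (some (r : Int)) none (s : Int)).getD []) = true) ↔
      ∃ q, MatchFrom old nm s (r + s * q) 0 := by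
  rw [slice?_step_eq old r s hr hs]
  simp only [Option.getD_some]
  rw [PySem.Chars.isIn_iff_infix, List.infix_iff_getElem?]
  have hlen : 1 ≤ nm.length := by
    cases nm with
    | nil => exact absurd rfl hnm
    | cons a l => simp
  set cnt := (old.length - r + s - 1) / s with hcnt
  have hq : ∀ q, q < cnt ↔ r + s * q < old.length := fun q => cnt_iff _ _ _ _ hr hs
  constructor
  · rintro ⟨k, hk, h⟩
    refine ⟨k, ?_⟩
    intro f _ hf
    have hfk : f + k < cnt := by
      simp only [List.length_map, List.length_range] at hk
      omega
    have hgot := h f (by simpa using hf)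
    rw [List.getElem?_map, List.getElem?_range hfk] at hgot
    simp only [Option.map_some, Option.some.injEq] at hgot
    have h2 : nm[f] = nm.getD f ' ' := (List.getD_eq_getElem nm ' ' (by simpa using hf)).symm
    rw [h2] at hgot
    constructor
    · have hb := (hq (f + k)).mp hfk
      calc r + s * k + s * f = r + s * (f + k) := by ring
        _ < old.length := hb
    · calc old.getD (r + s * k + s * f) ' ' = old.getD (r + s * (f + k)) ' ' := by ring_nf
        _ = nm.getD f ' ' := hgot
  · rintro ⟨q, hm⟩
    refine ⟨q, ?_, ?_⟩
    · simp only [List.length_map, List.length_range]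
      have hb := (hm (nm.length - 1) (by omega) (by omega)).1
      have h2 : q + (nm.length - 1) < cnt := by
        rw [hq]
        calc r + s * (q + (nm.length - 1)) = r + s * q + s * (nm.length - 1) := by ring
          _ < old.length := hb
      omega
    · intro i hi
      have hi' : i < nm.length := by simpa using hi
      have hic : i + q < cnt := by
        rw [hq]
        have hb := (hm i (by omega) hi').1
        calc r + s * (i + q) = r + s * q + s * i := by ring
          _ < old.length := hb
      rw [List.getElem?_map, List.getElem?_range hic]
      have h2 : nm[i] = nm.getD i ' ' := (List.getD_eq_getElem nm ' ' hi').symm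
      have hv := (hm i (by omega) hi').2
      simp only [Option.map_some, Option.some.injEq, h2]
      calc old.getD (r + s * (i + q)) ' ' = old.getD (r + s * q + s * i) ' ' := by ring_nf
        _ = nm.getD i ' ' := hv

lemma bridge (old nm : List Char) (hnm : nm ≠ []) (s : Nat) (hs : 1 ≤ s) :
    (∃ idx < old.length, MatchFrom old nm s idx 0) ↔
      (∃ r < s, ∃ q, MatchFrom old nm s (r + s * q) 0) := by
  have hlen : 1 ≤ nm.length := by
    cases nm with
    | nil => exact absurd rfl hnm
    | cons a l => simp
  constructor
  · rintro ⟨idx, _, hm⟩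
    refine ⟨idx % s, Nat.mod_lt _ (by omega), idx / s, ?_⟩
    rwa [Nat.mod_add_div idx s]
  · rintro ⟨r, _, q, hm⟩
    refine ⟨r + s * q, ?_, hm⟩
    have hb := (hm 0 (le_refl 0) (by omega)).1
    simpa using hb

lemma main_eq (oldName name : String) (h : Pre_solve oldName name) :
    solve oldName name = solve_alt oldName name := by
  rcases eq_or_ne oldName.toList [] with he | hne
  · unfold solve solve_alt; simp [he]
  · have hnm : name.toList ≠ [] := by
      rcases h with h | h
      · exfalso; apply hne; rw [h]; rfl
      · exact fun hc => h (String.toList_eq_nil_iff.mp hc)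
    have hlen : 1 ≤ name.toList.length := by
      cases hx : name.toList with
      | nil => exact absurd hx hnm
      | cons a l => simp
    have key : ((List.range oldName.toList.length).any (fun indent =>
         (List.range oldName.toList.length).any (fun index =>
           (oldName.toList.getD index ' ' == name.toList.getD 0 ' ') &&
           (pvAWhile oldName.toList name.toList index (indent + 1) 1 == name.toList.length)))) =
        ((List.range oldName.toList.length).any (fun i =>
         (List.range (i + 1)).any (fun r =>
           PySem.Chars.isIn name.toList
             ((PySem.List.slice? oldName.toList (some (r : Int)) none ((i : Int) + 1)).getD [])))) := by
      apply Bool.eq_iff_iff.mpr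
      constructor
      · intro hA
        rcases List.any_eq_true.mp hA with ⟨i, hi, hinner⟩
        have hi' : i < oldName.toList.length := List.mem_range.mp hi
        have h1 := (A_any_iff oldName.toList name.toList hnm i).mp hinner
        rcases (bridge oldName.toList name.toList hnm (i + 1) (by omega)).mp h1
          with ⟨r, hr, q, hm⟩
        have hrlen : r < oldName.toList.length := by omega
        apply List.any_eq_true.mpr
        refine ⟨i, hi, ?_⟩
        apply List.any_eq_true.mpr
        refine ⟨r, List.mem_range.mpr hr, ?_⟩
        rw [show ((i : Int) + 1) = (((i + 1 : Nat)) : Int) by push_cast; ring]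
        exact (B_inner_iff oldName.toList name.toList hnm r (i + 1) hrlen (by omega)).mpr ⟨q, hm⟩
      · intro hB
        rcases List.any_eq_true.mp hB with ⟨i, hi, hinner⟩
        have hi' : i < oldName.toList.length := List.mem_range.mp hi
        rcases List.any_eq_true.mp hinner with ⟨r, hrmem, hisin⟩
        have hr : r < i + 1 := List.mem_range.mp hrmem
        have hrlen : r < oldName.toList.length := by omega
        rw [show ((i : Int) + 1) = (((i + 1 : Nat)) : Int) by push_cast; ring] at hisin
        have h1 := (B_inner_iff oldName.toList name.toList hnm r (i + 1) hrlen (by omega)).mp hisin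
        have h2 := (bridge oldName.toList name.toList hnm (i + 1) (by omega)).mpr ⟨r, hr, h1⟩
        apply List.any_eq_true.mpr
        exact ⟨i, hi, (A_any_iff oldName.toList name.toList hnm i).mpr h2⟩
    unfold solve solve_alt
    show (if _ = true then (1 : Int) else 0) = (if _ = true then (1 : Int) else 0)
    rw [key]

-- ===== VERDICT (by name: the statement is the Claim_ definition above) =====
theorem solve_spec : Claim_equal_solve := by
  intro oldName name _ hpre
  unfold Spec_solve
  exact main_eq oldName name hpre
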